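-- pv_equiv track=rewrite | github.com/pilotmain/aethos | app/services/decision_summary.py | _sanitize_reason
-- ===== SOURCE A (Python) =====
-- R_GENERAL = "Nexa used the general assistant for this request."
--
-- _BANNED_SUBSTRINGS = (
--     "chain of thought",
--     "chain-of-thought",
--     "cot",
--     "internal",
--     "hidden",
--     "system prompt",
-- )
--
-- def _sanitize_reason(s: str | None) -> str:
--     t = (s or "").strip()
--     for b in _BANNED_SUBSTRINGS:
--         if b in t.lower():
--             t = R_GENERAL
--             break
--     if len(t) > 500:
--         t = t[:497] + "…"
--     return t
-- ===== SOURCE B (Python) =====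
-- R_GENERAL = "Nexa used the general assistant for this request."
--
-- _BANNED_SUBSTRINGS = (
--     "chain of thought",
--     "chain-of-thought",
--     "cot",
--     "internal",
--     "hidden",
--     "system prompt",
-- )
--
-- def _sanitize_reason(s=None):
--     # Single left-to-right scan: at each position of the lowercased text, test
--     # whether some banned substring starts there (position-major instead of
--     # A's substring-major k separate 'in' scans), with early return.
--     t = (s or "").strip()
--     tl = t.lower()
--     for i in range(len(tl)):
--         for b in _BANNED_SUBSTRINGS:
--             if tl.startswith(b, i):
--                 return R_GENERAL
--     return t if len(t) <= 500 else t[:497] + "…"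
-- ===== Notes on version B (the rewrite author's own statement) =====
-- stated objective: alternative
-- what changed: Replaces A's substring-major loop (one full 'in' scan per banned word, then a mutate-and-truncate tail) with a single position-major scan of the lowercased text that tests every banned word at each position and early-returns R_GENERAL, followed by a conditional-expression truncation.
import Mathlib
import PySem

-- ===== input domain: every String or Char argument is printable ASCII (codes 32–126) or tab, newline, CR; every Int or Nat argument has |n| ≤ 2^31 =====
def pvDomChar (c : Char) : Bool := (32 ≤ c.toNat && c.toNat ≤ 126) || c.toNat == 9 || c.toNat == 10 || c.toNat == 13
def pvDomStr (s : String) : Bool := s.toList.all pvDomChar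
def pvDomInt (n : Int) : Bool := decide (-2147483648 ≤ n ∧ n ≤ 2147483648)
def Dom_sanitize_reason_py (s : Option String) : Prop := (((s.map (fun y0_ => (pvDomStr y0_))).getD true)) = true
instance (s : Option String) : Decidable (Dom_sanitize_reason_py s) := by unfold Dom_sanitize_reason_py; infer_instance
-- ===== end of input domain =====

-- B replaces A's per-substring 'in' scans with one position-major scan of the lowercased text (alternative decomposition, same cost).

-- ===== PORT A =====
def pvRGeneral : List Char := "Nexa used the general assistant for this request.".toList

def pvBanned : List (List Char) :=
  ["chain of thought".toList, "chain-of-thought".toList, "cot".toList,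
   "internal".toList, "hidden".toList, "system prompt".toList]

-- for b in _BANNED_SUBSTRINGS: if b in t.lower(): t = R_GENERAL; break
def pvLoopA : List (List Char) → List Char → List Char
  | [], t => t
  | b :: rest, t =>
      if PySem.Chars.isIn b (PySem.Chars.lower t) then pvRGeneral else pvLoopA rest t

def sanitize_reason_py (s : Option String) : String :=
  let t := PySem.Chars.strip (s.getD "").toList
  let t2 := pvLoopA pvBanned t
  String.ofList (if 500 < t2.length then PySem.List.slice t2 none (some 497) ++ ['…'] else t2)

-- ===== PORT B =====
-- for i in range(len(tl)): for b in _BANNED_SUBSTRINGS: if tl.startswith(b, i): return R_GENERAL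
-- (startswith(b, i) on the i-th suffix; the scan walks the suffixes of tl)
def pvScanB : List Char → Bool
  | [] => false
  | c :: rest =>
      pvBanned.any (fun b => PySem.Chars.startswith (c :: rest) b) || pvScanB rest

def sanitize_reason_py_alt (s : Option String) : String :=
  let t := PySem.Chars.strip (s.getD "").toList
  let tl := PySem.Chars.lower t
  if pvScanB tl then String.ofList pvRGeneral
  else if t.length ≤ 500 then String.ofList t
  else String.ofList (PySem.List.slice t none (some 497) ++ ['…'])

-- ===== PRECONDITION & SPEC =====
def Spec_sanitize_reason_py (s : Option String) (out : String) : Prop := out = sanitize_reason_py_alt s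
instance (s : Option String) (out : String) : Decidable (Spec_sanitize_reason_py s out) := by unfold Spec_sanitize_reason_py; infer_instance

-- ===== CLAIM (what is proved, stated in full; the proofs are below) =====
def Claim_equal_sanitize_reason_py : Prop := ∀ (s : Option String), Dom_sanitize_reason_py s → Spec_sanitize_reason_py s (sanitize_reason_py s)

-- ===== LEMMAS AND PROOFS =====

-- B's position-major scan finds a banned word iff some banned word is an infix.
theorem pvScanB_iff (l : List Char) :
    pvScanB l = true ↔ ∃ b ∈ pvBanned, b <:+: l := by
  induction l with
  | nil =>
      simp only [pvScanB, List.infix_nil]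
      constructor
      · intro h; cases h
      · rintro ⟨b, hb, rfl⟩; revert hb; decide
  | cons c rest ih =>
      simp only [pvScanB, Bool.or_eq_true, List.any_eq_true, PySem.Chars.startswith_iff, ih]
      constructor
      · rintro (⟨b, hb, hp⟩ | ⟨b, hb, hi⟩)
        · exact ⟨b, hb, List.infix_cons_iff.mpr (Or.inl hp)⟩
        · exact ⟨b, hb, List.infix_cons_iff.mpr (Or.inr hi)⟩
      · rintro ⟨b, hb, hi⟩
        rcases List.infix_cons_iff.mp hi with hp | hi'
        · exact Or.inl ⟨b, hb, hp⟩
        · exact Or.inr ⟨b, hb, hi'⟩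

-- A's substring-major loop returns R_GENERAL iff some banned word is an infix of lower t.
theorem pvLoopA_eq (banned : List (List Char)) (t : List Char) :
    pvLoopA banned t =
      if ∃ b ∈ banned, b <:+: PySem.Chars.lower t then pvRGeneral else t := by
  induction banned with
  | nil => simp [pvLoopA]
  | cons b rest ih =>
      simp only [pvLoopA]
      by_cases hb : PySem.Chars.isIn b (PySem.Chars.lower t) = true
      · rw [if_pos hb,
          if_pos ⟨b, List.mem_cons_self, (PySem.Chars.isIn_iff_infix b _).mp hb⟩]
      · have hni : ¬ b <:+: PySem.Chars.lower t := fun h =>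
          hb ((PySem.Chars.isIn_iff_infix b _).mpr h)
        rw [if_neg hb, ih]
        by_cases hr : ∃ b' ∈ rest, b' <:+: PySem.Chars.lower t
        · obtain ⟨b', hb', hi⟩ := hr
          rw [if_pos ⟨b', hb', hi⟩, if_pos ⟨b', List.mem_cons_of_mem _ hb', hi⟩]
        · rw [if_neg hr, if_neg (by
            rintro ⟨b', hb', hi⟩
            rcases List.mem_cons.mp hb' with rfl | h
            · exact hni hi
            · exact hr ⟨b', h, hi⟩)]

theorem pvRGeneral_short : pvRGeneral.length ≤ 500 := by decide

-- ===== VERDICT (by name: the statement is the Claim_ definition above) =====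
theorem sanitize_reason_py_spec : Claim_equal_sanitize_reason_py := by
  intro s _
  unfold Spec_sanitize_reason_py sanitize_reason_py sanitize_reason_py_alt
  dsimp only
  set t := PySem.Chars.strip (s.getD "").toList with ht
  rw [pvLoopA_eq]
  by_cases h : ∃ b ∈ pvBanned, b <:+: PySem.Chars.lower t
  · have hs : pvScanB (PySem.Chars.lower t) = true := (pvScanB_iff _).mpr h
    simp only [h, if_true, hs]
    rw [if_neg (by exact Nat.not_lt.mpr pvRGeneral_short)]
  · have hs : pvScanB (PySem.Chars.lower t) = false := by
      rw [Bool.eq_false_iff]; intro hc; exact h ((pvScanB_iff _).mp hc)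
    simp only [h, if_false, hs, Bool.false_eq_true]
    by_cases hl : 500 < t.length
    · rw [if_pos hl, if_neg (by omega)]
    · rw [if_neg hl, if_pos (by omega)]
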